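-- pv_equiv track=rewrite | github.com/165Nuno/PL2023 | TPC3/tpc3.py | criarDictFrequencias
-- ===== SOURCE A (Python) =====
-- def criarDictFrequencias(processedLinhas):
--     # Criar um dicionário para armazenar as frequências de processos por ano
--     freq_por_ano = {}
--
--     # Criar um set para armazenar as pastas já contadas em cada ano
--     pastas_contadas_por_ano = {}
--
--     # Iterar sobre as linhas processadas
--     for linha in processedLinhas:
--         # Extrair o ano e a pasta do processo
--         ano = linha["Data"][:4]
--         pasta = linha["Pasta"]
--
--         # Se a pasta já foi contada para o ano, passar para a próxima linha
--         if ano in pastas_contadas_por_ano and pasta in pastas_contadas_por_ano[ano]: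
--             continue
--
--         # Se o ano já estiver no dicionário, incrementar a contagem de processos
--         if ano in freq_por_ano:
--             freq_por_ano[ano] += 1
--         # Caso contrário, adicionar o ano ao dicionário com uma contagem inicial de 1
--         else:
--             freq_por_ano[ano] = 1
--
--         # Adicionar a pasta ao set de pastas contadas para o ano
--         if ano in pastas_contadas_por_ano:
--             pastas_contadas_por_ano[ano].add(pasta)
--         # Caso contrário, criar um novo set com a pasta
--         else:
--             pastas_contadas_por_ano[ano] = {pasta}
--
--     return freq_por_ano
-- ===== SOURCE B (Python) =====
-- def criarDictFrequencias(processedLinhas):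
--     # Two staged passes: dedupe the (year, folder) pairs by first occurrence with
--     # dict.fromkeys, then tally the years of the distinct pairs.
--     pares = dict.fromkeys((linha["Data"][:4], linha["Pasta"]) for linha in processedLinhas)
--     freq = {}
--     for ano, _ in pares:
--         freq[ano] = freq.get(ano, 0) + 1
--     return freq
-- ===== Notes on version B (the rewrite author's own statement) =====
-- stated objective: alternative
-- what changed: Replaces A's single pass with two parallel dicts (a running counter plus per-year seen-folder sets and an early-continue guard) by two staged passes with no sets at all: first dedupe the (year, folder) pairs by first occurrence via dict.fromkeys, then tally years of the distinct pairs with a plain counter loop.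
import Mathlib
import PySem

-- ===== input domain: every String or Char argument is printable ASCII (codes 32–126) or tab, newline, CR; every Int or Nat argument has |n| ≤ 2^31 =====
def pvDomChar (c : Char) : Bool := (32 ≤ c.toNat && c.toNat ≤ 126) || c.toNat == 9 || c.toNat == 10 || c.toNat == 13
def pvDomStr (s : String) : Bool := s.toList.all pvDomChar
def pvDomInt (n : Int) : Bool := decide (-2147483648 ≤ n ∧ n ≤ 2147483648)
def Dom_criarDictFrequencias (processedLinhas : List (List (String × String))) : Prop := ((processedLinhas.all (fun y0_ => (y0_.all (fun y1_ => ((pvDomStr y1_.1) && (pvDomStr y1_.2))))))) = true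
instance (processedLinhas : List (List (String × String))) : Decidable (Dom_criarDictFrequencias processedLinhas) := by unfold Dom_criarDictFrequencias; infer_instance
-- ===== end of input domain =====

-- B drops A's single pass with two parallel dicts (running counter + per-year seen-folder sets
-- with an early-continue guard) for two staged passes: dedupe the (year, folder) pairs by first
-- occurrence (dict.fromkeys), then tally the years of the distinct pairs.

-- shared helpers: extracting linha["Data"][:4] and linha["Pasta"] (each linha is a dict)
def pvAno (linha : List (String × String)) : String :=
  String.ofList (PySem.List.slice (((PySem.Dict.mk linha).get? "Data").getD "").toList none (some 4))

def pvPasta (linha : List (String × String)) : String :=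
  ((PySem.Dict.mk linha).get? "Pasta").getD ""

-- ===== PORT A =====
def pvStepA (st : PySem.Dict String Int × PySem.Dict String (PySem.Set String))
    (linha : List (String × String)) :
    PySem.Dict String Int × PySem.Dict String (PySem.Set String) :=
  let ano := pvAno linha
  let pasta := pvPasta linha
  if st.2.contains ano && PySem.Set.contains (st.2.getD ano PySem.Set.empty) pasta then
    st
  else
    let freq := if st.1.contains ano then st.1.insert ano (st.1.getD ano 0 + 1)
                else st.1.insert ano 1
    let pastas := if st.2.contains ano then
                    st.2.modify ano PySem.Set.empty (fun s => PySem.Set.add s pasta)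
                  else st.2.insert ano (PySem.Set.ofList [pasta])
    (freq, pastas)

def criarDictFrequencias (processedLinhas : List (List (String × String))) : List (String × Int) :=
  (processedLinhas.foldl pvStepA (PySem.Dict.empty, PySem.Dict.empty)).1.items

-- ===== PORT B =====
def criarDictFrequencias_alt (processedLinhas : List (List (String × String))) : List (String × Int) :=
  let pares := PySem.List.dedup (processedLinhas.map (fun linha => (pvAno linha, pvPasta linha)))
  (pares.foldl (fun d p => d.insert p.1 (d.getD p.1 0 + 1)) PySem.Dict.empty).items

-- ===== PRECONDITION & SPEC =====
-- Pre_ excludes exactly the inputs where the Python A raises KeyError: a linha missing key "Data" or "Pasta".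
def Pre_criarDictFrequencias (processedLinhas : List (List (String × String))) : Prop :=
  (processedLinhas.all (fun l => l.any (fun p => p.1 == "Data") && l.any (fun p => p.1 == "Pasta"))) = true
instance (processedLinhas : List (List (String × String))) : Decidable (Pre_criarDictFrequencias processedLinhas) := by unfold Pre_criarDictFrequencias; infer_instance

def pvWitness_criarDictFrequencias : (List (List (String × String))) :=
  [[("Data", "2023-01-15"), ("Pasta", "X")], [("Data", "2023-02-01"), ("Pasta", "X")]]

def Spec_criarDictFrequencias (processedLinhas : List (List (String × String))) (out : List (String × Int)) : Prop := out = criarDictFrequencias_alt processedLinhas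
instance (processedLinhas : List (List (String × String))) (out : List (String × Int)) : Decidable (Spec_criarDictFrequencias processedLinhas out) := by unfold Spec_criarDictFrequencias; infer_instance

-- ===== CLAIM (what is proved, stated in full; the proofs are below) =====
def Claim_equal_criarDictFrequencias : Prop := ∀ (processedLinhas : List (List (String × String))), Dom_criarDictFrequencias processedLinhas → Pre_criarDictFrequencias processedLinhas → Spec_criarDictFrequencias processedLinhas (criarDictFrequencias processedLinhas)

-- ===== LEMMAS AND PROOFS =====

-- A's two accumulators, each as a fold over a list of (year, folder) pairs
def pvCnt (S : List (String × String)) : PySem.Dict String Int :=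
  S.foldl (fun d p => d.insert p.1 (d.getD p.1 0 + 1)) PySem.Dict.empty

def pvSetsStep (m : PySem.Dict String (PySem.Set String)) (p : String × String) :
    PySem.Dict String (PySem.Set String) :=
  m.modify p.1 PySem.Set.empty (fun s => PySem.Set.add s p.2)

def pvSets (S : List (String × String)) : PySem.Dict String (PySem.Set String) :=
  S.foldl pvSetsStep PySem.Dict.empty

-- membership in the dict-of-sets accumulator
theorem pvMem_sets_getD (S : List (String × String))
    (m : PySem.Dict String (PySem.Set String)) (a b : String) :
    b ∈ (S.foldl pvSetsStep m).getD a PySem.Set.empty ↔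
      b ∈ m.getD a PySem.Set.empty ∨ (a, b) ∈ S := by
  induction S generalizing m with
  | nil => simp
  | cons p t ih =>
      simp only [List.foldl_cons, ih]
      have hstep : (pvSetsStep m p).getD a PySem.Set.empty
          = if a = p.1 then PySem.Set.add (m.getD p.1 PySem.Set.empty) p.2
            else m.getD a PySem.Set.empty := PySem.Dict.getD_modify m p.1 a _ _
      rw [hstep]
      by_cases h : a = p.1
      · subst h
        simp [PySem.Set.mem_add, Prod.ext_iff, or_assoc, or_comm, or_left_comm]
      · have hne : ¬ (a, b) = p := fun he => h (congrArg Prod.fst he)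
        simp only [if_neg h, List.mem_cons]
        tauto

theorem pvContains_sets (S : List (String × String)) (a : String) :
    (pvSets S).contains a = true ↔ a ∈ S.map Prod.fst := by
  unfold pvSets
  have hk' : (S.foldl pvSetsStep PySem.Dict.empty).keys
      = PySem.Set.update (PySem.Dict.empty : PySem.Dict String (PySem.Set String)).keys
          (S.map Prod.fst) :=
    PySem.Dict.keys_foldl_modify_key S Prod.fst (PySem.Set.empty : PySem.Set String)
      (fun _ p s => PySem.Set.add s p.2) PySem.Dict.empty
  rw [PySem.Dict.contains_iff_mem_keys, hk', PySem.Dict.keys_empty]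
  rw [show PySem.Set.update ([] : PySem.Set String) (S.map Prod.fst)
        = PySem.Set.ofList (S.map Prod.fst) from PySem.Set.update_nil_left _]
  simp [PySem.Set.mem_ofList]

-- A's guard, on the invariant state, tests exactly membership of the pair in S
theorem pvGuard_iff (S : List (String × String)) (a b : String) :
    ((pvSets S).contains a && PySem.Set.contains ((pvSets S).getD a PySem.Set.empty) b) = true
      ↔ (a, b) ∈ S := by
  rw [Bool.and_eq_true, PySem.Set.contains_iff]
  constructor
  · rintro ⟨_, hm⟩
    have := (pvMem_sets_getD S PySem.Dict.empty a b).mp hm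
    simpa using this
  · intro hab
    refine ⟨(pvContains_sets S a).mpr ?_, ?_⟩
    · exact List.mem_map.mpr ⟨(a, b), hab, rfl⟩
    · exact (pvMem_sets_getD S PySem.Dict.empty a b).mpr (by simp [hab])

-- A's two conditional updates collapse to the unconditional fold steps
theorem pvFreq_branch (d : PySem.Dict String Int) (a : String) :
    (if d.contains a then d.insert a (d.getD a 0 + 1) else d.insert a 1)
      = d.insert a (d.getD a 0 + 1) := by
  by_cases h : d.contains a = true
  · rw [if_pos h]
  · have h0 : d.contains a = false := by simpa using h
    rw [if_neg (by simp [h0]), PySem.Dict.getD_of_not_contains d 0 h0]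
    norm_num

theorem pvSets_branch (m : PySem.Dict String (PySem.Set String)) (a b : String) :
    (if m.contains a then m.modify a PySem.Set.empty (fun s => PySem.Set.add s b)
     else m.insert a (PySem.Set.ofList [b])) = pvSetsStep m (a, b) := by
  by_cases h : m.contains a = true
  · rw [if_pos h]; rfl
  · have h0 : m.contains a = false := by simpa using h
    rw [if_neg (by simp [h0])]
    show m.insert a (PySem.Set.ofList [b])
        = m.modify a PySem.Set.empty (fun s => PySem.Set.add s b)
    show m.insert a (PySem.Set.ofList [b])
        = m.insert a (PySem.Set.add (m.getD a PySem.Set.empty) b)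
    rw [PySem.Dict.getD_of_not_contains m PySem.Set.empty h0]
    rfl

-- main invariant: A's fold over the lines is B's two folds over the deduped pairs
theorem pvMain (pl : List (List (String × String))) (S : List (String × String)) :
    pl.foldl pvStepA (pvCnt S, pvSets S)
      = (pvCnt ((pl.map (fun l => (pvAno l, pvPasta l))).foldl PySem.Set.add S),
         pvSets ((pl.map (fun l => (pvAno l, pvPasta l))).foldl PySem.Set.add S)) := by
  induction pl generalizing S with
  | nil => rfl
  | cons linha t ih =>
      simp only [List.foldl_cons, List.map_cons]
      by_cases hmem : (pvAno linha, pvPasta linha) ∈ S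
      · have hg := (pvGuard_iff S (pvAno linha) (pvPasta linha)).mpr hmem
        have hstep : pvStepA (pvCnt S, pvSets S) linha = (pvCnt S, pvSets S) := by
          unfold pvStepA; rw [if_pos hg]
        rw [hstep, PySem.Set.add_of_mem hmem, ih]
      · have hg : ((pvSets S).contains (pvAno linha) &&
            PySem.Set.contains ((pvSets S).getD (pvAno linha) PySem.Set.empty)
              (pvPasta linha)) ≠ true := fun h =>
          hmem ((pvGuard_iff S (pvAno linha) (pvPasta linha)).mp h)
        have hstep : pvStepA (pvCnt S, pvSets S) linha
            = (pvCnt (S ++ [(pvAno linha, pvPasta linha)]),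
               pvSets (S ++ [(pvAno linha, pvPasta linha)])) := by
          unfold pvStepA
          rw [if_neg hg]
          refine Prod.ext ?_ ?_
          · show (if (pvCnt S).contains (pvAno linha) then _ else _) = _
            rw [pvFreq_branch]
            unfold pvCnt
            rw [List.foldl_append]; rfl
          · show (if (pvSets S).contains (pvAno linha) then _ else _) = _
            rw [pvSets_branch]
            unfold pvSets
            rw [List.foldl_append]; rfl
        rw [hstep, PySem.Set.add_of_not_mem hmem, ih]

-- ===== VERDICT (by name: the statement is the Claim_ definition above) =====
theorem criarDictFrequencias_spec : Claim_equal_criarDictFrequencias := by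
  intro pl _ _
  show criarDictFrequencias pl = criarDictFrequencias_alt pl
  unfold criarDictFrequencias criarDictFrequencias_alt
  have h0 : ((PySem.Dict.empty : PySem.Dict String Int),
      (PySem.Dict.empty : PySem.Dict String (PySem.Set String))) = (pvCnt [], pvSets []) := rfl
  rw [h0, pvMain pl []]
  have hded : PySem.List.dedup (pl.map (fun linha => (pvAno linha, pvPasta linha)))
      = (pl.map (fun l => (pvAno l, pvPasta l))).foldl PySem.Set.add [] := by
    rw [PySem.List.dedup_eq_ofList, PySem.Set.ofList_eq_foldl]
  simp only [hded]
  rfl
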